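-- pv_equiv track=rewrite | github.com/Jaksmiths/Michigan_Mahjong | server/app/logic.py | tile_score
-- ===== SOURCE A (Python) =====
-- from collections import Counter
-- import copy
--
-- def tile_score(type, tiles):
--     lwt_score = 1000000
--     discard = None
--     para = [10, 2, 1]
--     scale = 10
--     if type in ['character', 'bamboo', 'dots']:
--         temp_tiles = copy.deepcopy(tiles)
--         type_set = set(temp_tiles)
--         vlist = sorted(list(type_set))
--         idx = 0
--         while idx < len(vlist):
--             if idx + 2 < len(vlist) and vlist[idx + 2] - vlist[idx + 1] == 1 and vlist[idx + 1] - vlist[idx] == 1 \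
--                     and vlist[idx] in temp_tiles and vlist[idx + 1] in temp_tiles and vlist[idx + 2] in temp_tiles:
--                 temp_tiles.remove(vlist[idx])
--                 temp_tiles.remove(vlist[idx + 1])
--                 temp_tiles.remove(vlist[idx + 2])
--             else:
--                 idx += 1
--
--         temp = dict(Counter(temp_tiles))
--         for k, v in temp.items():
--             if v >= 3:
--                 temp_tiles.remove(k)
--                 temp_tiles.remove(k)
--                 temp_tiles.remove(k)
--
--         for index, c in enumerate(temp_tiles):
--             score = 0
--             for cc in temp_tiles:
--                 gap = abs(cc - c)
--                 if gap < 3: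
--                     score += para[gap] * scale
--
--             if score < lwt_score:
--                 lwt_score = score
--                 discard = c
--     else:
--         temp = dict(Counter(tiles))
--         for k, v in temp.items():
--             score = para[0] * v * scale
--             if score < lwt_score:
--                 lwt_score = score
--                 discard = k
--     return discard, lwt_score
-- ===== SOURCE B (Python) =====
-- from collections import Counter
--
--
-- def tile_score(type, tiles):
--     if type in ['character', 'bamboo', 'dots']:
--         cnt = Counter(tiles)
--         rem = dict(cnt)
--         vlist = sorted(rem)
--         # remove runs of three consecutive values in count space (min-subtraction
--         # replaces A's repeated list .remove passes)
--         for i in range(len(vlist) - 2):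
--             a, b, c = vlist[i], vlist[i + 1], vlist[i + 2]
--             if c - b == 1 and b - a == 1:
--                 m = min(rem[a], min(rem[b], rem[c]))
--                 rem[a] = rem[a] - m
--                 rem[b] = rem[b] - m
--                 rem[c] = rem[c] - m
--         # remove one triplet per value
--         for k in vlist:
--             if rem[k] >= 3:
--                 rem[k] = rem[k] - 3
--         # reconstruct the surviving tiles (last rem[x] occurrences of each value)
--         skip = {}
--         for k in cnt:
--             skip[k] = cnt[k] - rem[k]
--         kept = []
--         for x in tiles:
--             if skip[x] > 0:
--                 skip[x] = skip[x] - 1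
--             else:
--                 kept.append(x)
--         # O(1) neighbour-weighted score per tile from the count map
--         discard, lwt = None, 1000000
--         for x in kept:
--             score = 10 * (10 * rem[x]
--                           + 2 * (rem.get(x - 1, 0) + rem.get(x + 1, 0))
--                           + (rem.get(x - 2, 0) + rem.get(x + 2, 0)))
--             if score < lwt:
--                 discard, lwt = x, score
--         return discard, lwt
--     else:
--         discard, lwt = None, 1000000
--         for k, v in Counter(tiles).items():
--             score = 100 * v
--             if score < lwt:
--                 discard, lwt = k, score
--         return discard, lwt
-- ===== Notes on version B (the rewrite author's own statement) =====
-- stated objective: faster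
-- what changed: B replaces A's list-mutation passes (repeated .remove scans and an O(n^2) all-pairs proximity rescore) by a single value-count map: run and triplet removal are done on counts (min-subtraction per consecutive triple), the surviving hand is rebuilt in one pass, and each tile's neighbour-weighted score is computed in O(1) from the count map.
import Mathlib
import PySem

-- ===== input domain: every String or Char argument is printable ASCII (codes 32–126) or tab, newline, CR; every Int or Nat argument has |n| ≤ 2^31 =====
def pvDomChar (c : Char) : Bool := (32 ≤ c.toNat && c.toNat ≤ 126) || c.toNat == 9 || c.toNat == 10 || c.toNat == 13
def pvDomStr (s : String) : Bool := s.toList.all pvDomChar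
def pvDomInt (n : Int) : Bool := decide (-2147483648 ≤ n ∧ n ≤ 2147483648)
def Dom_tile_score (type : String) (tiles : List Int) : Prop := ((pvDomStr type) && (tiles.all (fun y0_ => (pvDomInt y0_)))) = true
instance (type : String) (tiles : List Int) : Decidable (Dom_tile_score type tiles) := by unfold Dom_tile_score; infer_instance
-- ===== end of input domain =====

-- B replaces A's quadratic list-mutation-and-rescan with one count map: run/triplet
-- removal in count space and O(1) neighbour-weighted scores (objective: faster).


-- ===== PORT A =====

-- 'temp_tiles.remove(v)' three times; membership is checked by the caller, getD is the unreachable fallback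
def pvRemove3 (t : List Int) (a b c : Int) : List Int :=
  let t1 := (PySem.List.remove? t a).getD t
  let t2 := (PySem.List.remove? t1 b).getD t1
  (PySem.List.remove? t2 c).getD t2

-- termination helper for pvRunLoop (cited by its decreasing_by)
theorem pvRemove3_length_lt (t : List Int) (a b c : Int)
    (hcb : c - b = 1) (hba : b - a = 1) (ha : a ∈ t) (hb : b ∈ t) (hc : c ∈ t) :
    (pvRemove3 t a b c).length < t.length := by
  simp only [pvRemove3]
  have hba' : b ≠ a := by omega
  have hca' : c ≠ a := by omega
  have hcb' : c ≠ b := by omega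
  rw [PySem.List.remove?_eq_some_erase t a ha, Option.getD_some]
  have hb1 : b ∈ t.erase a := (List.mem_erase_of_ne hba').mpr hb
  rw [PySem.List.remove?_eq_some_erase _ b hb1, Option.getD_some]
  have hc1 : c ∈ (t.erase a).erase b :=
    (List.mem_erase_of_ne hcb').mpr ((List.mem_erase_of_ne hca').mpr hc)
  rw [PySem.List.remove?_eq_some_erase _ c hc1, Option.getD_some]
  have l1 := List.length_erase_of_mem ha
  have l2 := List.length_erase_of_mem hb1
  have l3 := List.length_erase_of_mem hc1
  have p1 : 0 < t.length := List.length_pos_of_mem ha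
  have p2 : 0 < (t.erase a).length := List.length_pos_of_mem hb1
  have p3 : 0 < ((t.erase a).erase b).length := List.length_pos_of_mem hc1
  omega

-- A's while-loop over idx on the sorted distinct values
def pvRunLoop (vlist : List Int) (temp : List Int) (idx : Nat) : List Int :=
  if hlt : idx < vlist.length then
    if hc : idx + 2 < vlist.length ∧ vlist.getD (idx + 2) 0 - vlist.getD (idx + 1) 0 = 1 ∧
        vlist.getD (idx + 1) 0 - vlist.getD idx 0 = 1 ∧ vlist.getD idx 0 ∈ temp ∧
        vlist.getD (idx + 1) 0 ∈ temp ∧ vlist.getD (idx + 2) 0 ∈ temp then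
      pvRunLoop vlist
        (pvRemove3 temp (vlist.getD idx 0) (vlist.getD (idx + 1) 0) (vlist.getD (idx + 2) 0)) idx
    else
      pvRunLoop vlist temp (idx + 1)
  else temp
termination_by (temp.length, vlist.length - idx)
decreasing_by
  · exact Prod.Lex.left _ _ (pvRemove3_length_lt temp _ _ _ hc.2.1 hc.2.2.1 hc.2.2.2.1 hc.2.2.2.2.1 hc.2.2.2.2.2)
  · exact Prod.Lex.right _ (by omega)

-- the inner 'for cc in temp_tiles' scoring loop; para = [10, 2, 1], scale = 10, gap = abs(cc - c)
def pvScoreA (temp2 : List Int) (c : Int) : Int :=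
  temp2.foldl (fun s cc =>
    if |cc - c| < 3 then s + (PySem.List.pyGet? ([10, 2, 1] : List Int) |cc - c|).getD 0 * 10 else s) 0

def tile_score (type : String) (tiles : List Int) : Option Int × Int :=
  if type = "character" ∨ type = "bamboo" ∨ type = "dots" then
    -- temp_tiles = deepcopy(tiles); vlist = sorted(list(set(temp_tiles)))
    let vlist := PySem.List.sorted (PySem.Set.ofList tiles) (fun x => x) false
    let temp1 := pvRunLoop vlist tiles 0
    -- for k, v in dict(Counter(temp_tiles)).items(): if v >= 3: remove k three times
    let temp2 := (PySem.Dict.counter temp1).items.foldl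
      (fun t kv => if kv.2 ≥ 3 then pvRemove3 t kv.1 kv.1 kv.1 else t) temp1
    -- for index, c in enumerate(temp_tiles): keep the first strictly smallest score
    (PySem.List.enumerate temp2 0).foldl (fun acc ic =>
      if pvScoreA temp2 ic.2 < acc.2 then (some ic.2, pvScoreA temp2 ic.2) else acc) (none, 1000000)
  else
    -- score = para[0] * v * scale
    (PySem.Dict.counter tiles).items.foldl (fun acc kv =>
      if (PySem.List.pyGet? ([10, 2, 1] : List Int) 0).getD 0 * kv.2 * 10 < acc.2 then
        (some kv.1, (PySem.List.pyGet? ([10, 2, 1] : List Int) 0).getD 0 * kv.2 * 10)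
      else acc) (none, 1000000)

-- ===== PORT B =====

-- one step of B's count-space run removal (body of 'for i in range(len(vlist) - 2)')
def pvSweepStepB (vlist : List Int) (d : PySem.Dict Int Int) (i : Nat) : PySem.Dict Int Int :=
  let a := vlist.getD i 0
  let b := vlist.getD (i + 1) 0
  let c := vlist.getD (i + 2) 0
  if c - b = 1 ∧ b - a = 1 then
    let m := min (d.getD a 0) (min (d.getD b 0) (d.getD c 0))
    let d1 := d.insert a (d.getD a 0 - m)
    let d2 := d1.insert b (d1.getD b 0 - m)
    d2.insert c (d2.getD c 0 - m)
  else d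

-- B's O(1) neighbour-weighted score of one tile from the count map
def pvScoreB (rem : PySem.Dict Int Int) (x : Int) : Int :=
  10 * (10 * rem.getD x 0
    + 2 * (rem.getD (x - 1) 0 + rem.getD (x + 1) 0)
    + (rem.getD (x - 2) 0 + rem.getD (x + 2) 0))

def tile_score_alt (type : String) (tiles : List Int) : Option Int × Int :=
  if type = "character" ∨ type = "bamboo" ∨ type = "dots" then
    let cnt := PySem.Dict.counter tiles
    let vlist := PySem.List.sorted cnt.keys (fun x => x) false
    -- run removal in count space
    let rem1 := (List.range (vlist.length - 2)).foldl (pvSweepStepB vlist) cnt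
    -- one triplet per value
    let rem2 := vlist.foldl (fun d k =>
      if d.getD k 0 ≥ 3 then d.insert k (d.getD k 0 - 3) else d) rem1
    -- skip = {k: cnt[k] - rem[k] for k in cnt}
    let skip := cnt.keys.foldl (fun d k => d.insert k (cnt.getD k 0 - rem2.getD k 0))
      (PySem.Dict.empty : PySem.Dict Int Int)
    -- kept = surviving tiles in original order
    let kept := (tiles.foldl (fun (p : PySem.Dict Int Int × List Int) x =>
      if p.1.getD x 0 > 0 then (p.1.insert x (p.1.getD x 0 - 1), p.2) else (p.1, p.2 ++ [x]))
      (skip, [])).2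
    -- keep the first strictly smallest score
    kept.foldl (fun acc x =>
      if pvScoreB rem2 x < acc.2 then (some x, pvScoreB rem2 x) else acc) (none, 1000000)
  else
    -- score = 100 * v
    (PySem.Dict.counter tiles).items.foldl (fun acc kv =>
      if 100 * kv.2 < acc.2 then (some kv.1, 100 * kv.2) else acc) (none, 1000000)

-- ===== PRECONDITION & SPEC =====
def Spec_tile_score (type : String) (tiles : List Int) (out : Option Int × Int) : Prop := out = tile_score_alt type tiles
instance (type : String) (tiles : List Int) (out : Option Int × Int) : Decidable (Spec_tile_score type tiles out) := by unfold Spec_tile_score; infer_instance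

-- ===== CLAIM (what is proved, stated in full; the proofs are below) =====
def Claim_equal_tile_score : Prop := ∀ (type : String) (tiles : List Int), Dom_tile_score type tiles → Spec_tile_score type tiles (tile_score type tiles)

-- ===== LEMMAS AND PROOFS =====

-- drop the first (f x) occurrences of each value x
def pvDrop : List Int → (Int → Int) → List Int
  | [], _ => []
  | x :: xs, f =>
    if 0 < f x then pvDrop xs (fun y => if y = x then f x - 1 else f y)
    else x :: pvDrop xs f

theorem pvDrop_nonpos (l : List Int) (f : Int → Int) (h : ∀ v, f v ≤ 0) : pvDrop l f = l := by
  induction l generalizing f with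
  | nil => rfl
  | cons x xs ih =>
    rw [pvDrop, if_neg (by have := h x; omega)]
    rw [ih f h]

theorem pvDrop_congr (l : List Int) (f g : Int → Int) (h : ∀ x ∈ l, f x = g x) :
    pvDrop l f = pvDrop l g := by
  induction l generalizing f g with
  | nil => rfl
  | cons x xs ih =>
    have hx := h x (by simp)
    rw [pvDrop, pvDrop, hx]
    split
    · exact ih _ _ (fun y hy => by by_cases hyx : y = x <;> simp [hyx, h y (List.mem_cons_of_mem _ hy)])
    · exact congrArg (x :: ·) (ih _ _ (fun y hy => h y (List.mem_cons_of_mem _ hy)))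

theorem pvDrop_cons (x : Int) (xs : List Int) (f : Int → Int) :
    pvDrop (x :: xs) f =
      if 0 < f x then pvDrop xs (fun y => if y = x then f x - 1 else f y)
      else x :: pvDrop xs f := rfl

theorem pvCount_cons (x : Int) (xs : List Int) (w : Int) :
    ((x :: xs).count w : Int) = (xs.count w : Int) + (if w = x then 1 else 0) := by
  rw [List.count_cons]
  by_cases hw : w = x
  · subst hw; simp
  · have hb : (x == w) = false := by simp [Ne.symm hw]
    simp [hb, hw]

theorem count_pvDrop (l : List Int) (f : Int → Int) (v : Int)
    (h : ∀ w, 0 ≤ f w ∧ f w ≤ (l.count w : Int)) :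
    ((pvDrop l f).count v : Int) = (l.count v : Int) - f v := by
  induction l generalizing f with
  | nil =>
    have := h v
    simp only [pvDrop, List.count_nil] at *
    omega
  | cons x xs ih =>
    rw [pvDrop_cons]
    split_ifs with hx
    · have harg : ∀ w, 0 ≤ (if w = x then f x - 1 else f w) ∧
          (if w = x then f x - 1 else f w) ≤ (xs.count w : Int) := by
        intro w
        have h1 := h w
        have h2 := pvCount_cons x xs w
        by_cases hw : w = x
        · subst hw
          rw [if_pos rfl]
          rw [if_pos rfl] at h2
          omega
        · rw [if_neg hw]
          rw [if_neg hw] at h2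
          omega
      rw [ih _ harg]
      have h2 := pvCount_cons x xs v
      by_cases hv : v = x
      · subst hv
        rw [if_pos rfl]
        rw [if_pos rfl] at h2
        omega
      · rw [if_neg hv]
        rw [if_neg hv] at h2
        omega
    · have hx0 : f x = 0 := by have := (h x).1; omega
      have harg : ∀ w, 0 ≤ f w ∧ f w ≤ (xs.count w : Int) := by
        intro w
        have h1 := h w
        have h2 := pvCount_cons x xs w
        by_cases hw : w = x
        · subst hw; rw [if_pos rfl] at h2; omega
        · rw [if_neg hw] at h2; omega
      rw [pvCount_cons x (pvDrop xs f) v, ih _ harg, pvCount_cons x xs v]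
      by_cases hv : v = x
      · subst hv
        rw [if_pos rfl]
        omega
      · rw [if_neg hv]
        omega

theorem pvDrop_comp (l : List Int) (f g : Int → Int) (hf : ∀ v, 0 ≤ f v) (hg : ∀ v, 0 ≤ g v) :
    pvDrop (pvDrop l f) g = pvDrop l (fun v => f v + g v) := by
  induction l generalizing f g with
  | nil => rfl
  | cons x xs ih =>
    by_cases hfx : 0 < f x
    · rw [pvDrop_cons, if_pos hfx, pvDrop_cons, if_pos (by have := hg x; omega)]
      rw [ih _ g (fun v => by by_cases hv : v = x <;> simp [hv] <;> [omega; exact hf v]) hg]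
      congr 1
      funext v
      by_cases hv : v = x <;> simp [hv] <;> omega
    · have hfx0 : f x = 0 := by have := hf x; omega
      by_cases hgx : 0 < g x
      · rw [pvDrop_cons, if_neg hfx, pvDrop_cons, if_pos hgx]
        rw [ih f _ hf (fun v => by by_cases hv : v = x <;> simp [hv] <;> [omega; exact hg v])]
        rw [pvDrop_cons, if_pos (by omega)]
        congr 1
        funext v
        by_cases hv : v = x <;> simp [hv, hfx0]
      · have hgx0 : g x = 0 := by have := hg x; omega
        rw [pvDrop_cons, if_neg hfx, pvDrop_cons, if_neg hgx, pvDrop_cons, if_neg (by omega)]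
        exact congrArg (x :: ·) (ih f g hf hg)

theorem erase_eq_pvDrop (l : List Int) (v : Int) :
    l.erase v = pvDrop l (fun y => if y = v then 1 else 0) := by
  induction l with
  | nil => rfl
  | cons x xs ih =>
    by_cases hx : x = v
    · subst hx
      rw [List.erase_cons_head, pvDrop_cons, if_pos (by simp)]
      rw [pvDrop_nonpos _ _ (fun w => by by_cases hw : w = x <;> simp [hw])]
    · rw [List.erase_cons_tail (by simp [hx]), pvDrop_cons, if_neg (by simp [hx])]
      exact congrArg (x :: ·) ih

-- remaining-count view of a list of tiles
def pvCnt (tiles : List Int) (v : Int) : Int := (tiles.count v : Int)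

def pvRestrict (tiles : List Int) (r : Int → Int) : List Int :=
  pvDrop tiles (fun v => pvCnt tiles v - r v)

def pvOK (tiles : List Int) (r : Int → Int) : Prop := ∀ v, 0 ≤ r v ∧ r v ≤ pvCnt tiles v

theorem count_pvRestrict (tiles : List Int) (r : Int → Int) (hOK : pvOK tiles r) (v : Int) :
    ((pvRestrict tiles r).count v : Int) = r v := by
  unfold pvRestrict
  rw [count_pvDrop _ _ _ (fun w => by have := hOK w; unfold pvCnt at *; omega)]
  have := hOK v
  unfold pvCnt at *
  omega

theorem mem_pvRestrict (tiles : List Int) (r : Int → Int) (hOK : pvOK tiles r) (v : Int) :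
    v ∈ pvRestrict tiles r ↔ 0 < r v := by
  have hc := count_pvRestrict tiles r hOK v
  rw [← List.count_pos_iff]
  omega

-- count-space form of the run-removal sweep
def pvSub3 (r : Int → Int) (a b c m : Int) : Int → Int :=
  fun v => if v = a then r a - m else if v = b then r b - m else if v = c then r c - m else r v

def pvSweep (vlist : List Int) (idx : Nat) (r : Int → Int) : Int → Int :=
  if idx < vlist.length then
    if idx + 2 < vlist.length ∧ vlist.getD (idx + 2) 0 - vlist.getD (idx + 1) 0 = 1 ∧
        vlist.getD (idx + 1) 0 - vlist.getD idx 0 = 1 then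
      pvSweep vlist (idx + 1) (pvSub3 r (vlist.getD idx 0) (vlist.getD (idx + 1) 0) (vlist.getD (idx + 2) 0)
        (min (r (vlist.getD idx 0)) (min (r (vlist.getD (idx + 1) 0)) (r (vlist.getD (idx + 2) 0)))))
    else pvSweep vlist (idx + 1) r
  else r
termination_by vlist.length - idx

theorem pvSweep_tail (vlist : List Int) :
    ∀ (n idx : Nat) (r : Int → Int), vlist.length - idx ≤ n → vlist.length ≤ idx + 2 →
    pvSweep vlist idx r = r := by
  intro n
  induction n with
  | zero =>
    intro idx r hn h
    rw [pvSweep, if_neg (by omega)]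
  | succ n ih =>
    intro idx r hn h
    by_cases hlt : idx < vlist.length
    · rw [pvSweep, if_pos hlt, if_neg (by omega)]
      exact ih (idx + 1) r (by omega) (by omega)
    · rw [pvSweep, if_neg hlt]

theorem pvOK_sub3 (tiles : List Int) (r : Int → Int) (a b c : Int) (hOK : pvOK tiles r) :
    pvOK tiles (pvSub3 r a b c (min (r a) (min (r b) (r c)))) := by
  intro v
  have h1 := hOK v
  have ha := hOK a
  have hb := hOK b
  have hc := hOK c
  simp only [pvSub3]
  split_ifs with e1 e2 e3
  · subst e1; omega
  · subst e2; omega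
  · subst e3; omega
  · omega

theorem pvSweep_ok (tiles vlist : List Int) :
    ∀ (n idx : Nat) (r : Int → Int), vlist.length - idx ≤ n → pvOK tiles r →
    pvOK tiles (pvSweep vlist idx r) := by
  intro n
  induction n with
  | zero =>
    intro idx r hn hOK
    rw [pvSweep, if_neg (by omega)]
    exact hOK
  | succ n ih =>
    intro idx r hn hOK
    by_cases hlt : idx < vlist.length
    · rw [pvSweep, if_pos hlt]
      split_ifs with hcon
      · exact ih (idx + 1) _ (by omega) (pvOK_sub3 tiles r _ _ _ hOK)
      · exact ih (idx + 1) r (by omega) hOK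
    · rw [pvSweep, if_neg hlt]
      exact hOK

theorem pvSweep_dec (vlist : List Int) (idx : Nat) (r : Int → Int) (a b c : Int)
    (ha : vlist.getD idx 0 = a) (hb : vlist.getD (idx + 1) 0 = b) (hc : vlist.getD (idx + 2) 0 = c)
    (hlen : idx + 2 < vlist.length) (h1 : c - b = 1) (h2 : b - a = 1) :
    pvSweep vlist idx (pvSub3 r a b c 1) = pvSweep vlist idx r := by
  have hd1 : b ≠ a := by omega
  have hd2 : c ≠ a := by omega
  have hd3 : c ≠ b := by omega
  conv_lhs => rw [pvSweep]
  conv_rhs => rw [pvSweep]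
  rw [ha, hb, hc]
  rw [if_pos (by omega : idx < vlist.length)]
  rw [if_pos (⟨hlen, h1, h2⟩ : idx + 2 < vlist.length ∧ c - b = 1 ∧ b - a = 1)]
  have hAB : pvSub3 (pvSub3 r a b c 1) a b c
      (min (pvSub3 r a b c 1 a) (min (pvSub3 r a b c 1 b) (pvSub3 r a b c 1 c)))
      = pvSub3 r a b c (min (r a) (min (r b) (r c))) := by
    funext v
    simp only [pvSub3, if_neg hd1, if_neg hd2, if_neg hd3]
    split_ifs with v1 v2 v3
    · omega
    · omega
    · omega
    · rfl
  rw [hAB]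
  rw [if_pos (by omega : idx < vlist.length)]
  rw [if_pos (⟨hlen, h1, h2⟩ : idx + 2 < vlist.length ∧ c - b = 1 ∧ b - a = 1)]

theorem pvErase_restrict (tiles : List Int) (r : Int → Int) (a : Int)
    (hOK : pvOK tiles r) (_ha : 0 < r a) :
    (pvRestrict tiles r).erase a = pvRestrict tiles (fun v => if v = a then r a - 1 else r v) := by
  rw [erase_eq_pvDrop]
  unfold pvRestrict
  rw [pvDrop_comp _ _ _ (fun v => by have h1 := hOK v; simp only [pvCnt] at h1 ⊢; omega)
    (fun v => by by_cases hv : v = a <;> simp [hv])]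
  congr 1
  funext v
  by_cases hv : v = a <;> simp [hv] <;> ring

theorem pvOK_upd (tiles : List Int) (r : Int → Int) (a d : Int) (hOK : pvOK tiles r)
    (h0 : 0 ≤ d) (h1 : d ≤ r a) :
    pvOK tiles (fun v => if v = a then d else r v) := by
  intro v
  have h2 := hOK v
  have h3 := hOK a
  by_cases hv : v = a <;> simp [hv] <;> omega

theorem pvRemoveStep (tiles : List Int) (r : Int → Int) (a : Int)
    (hOK : pvOK tiles r) (ha : 0 < r a) :
    (PySem.List.remove? (pvRestrict tiles r) a).getD (pvRestrict tiles r)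
      = pvRestrict tiles (fun v => if v = a then r a - 1 else r v) := by
  rw [PySem.List.remove?_eq_some_erase _ a ((mem_pvRestrict _ _ hOK a).mpr ha), Option.getD_some]
  exact pvErase_restrict tiles r a hOK ha

theorem pvRemove3_restrict (tiles : List Int) (r : Int → Int) (a b c : Int) (hOK : pvOK tiles r)
    (hab : b ≠ a) (hac : c ≠ a) (hbc : c ≠ b)
    (ha : 0 < r a) (hb : 0 < r b) (hc : 0 < r c) :
    pvRemove3 (pvRestrict tiles r) a b c = pvRestrict tiles (pvSub3 r a b c 1) := by
  simp only [pvRemove3]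
  rw [pvRemoveStep tiles r a hOK ha]
  have hOK1 : pvOK tiles (fun v => if v = a then r a - 1 else r v) :=
    pvOK_upd tiles r a (r a - 1) hOK (by omega) (by omega)
  rw [pvRemoveStep tiles (fun v => if v = a then r a - 1 else r v) b hOK1
      (by simp only [if_neg hab]; omega)]
  have e2 : (fun v => (if v = b then (if b = a then r a - 1 else r b) - 1
        else if v = a then r a - 1 else r v))
      = (fun v => if v = a then r a - 1 else if v = b then r b - 1 else r v) := by
    funext v
    simp only [if_neg hab]
    by_cases v1 : v = a
    · simp [v1, Ne.symm hab]
    · by_cases v2 : v = b <;> simp [v1, v2, hab]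
  rw [e2]
  have hOK2 : pvOK tiles (fun v => if v = a then r a - 1 else if v = b then r b - 1 else r v) := by
    intro v
    have h1 := hOK v
    have h2 := hOK a
    have h3 := hOK b
    by_cases v1 : v = a
    · simp [v1]; omega
    · by_cases v2 : v = b
      · simp [v1, v2]; omega
      · simp [v1, v2]; omega
  rw [pvRemoveStep tiles (fun v => if v = a then r a - 1 else if v = b then r b - 1 else r v) c hOK2
      (by simp only [if_neg hac, if_neg hbc]; omega)]
  congr 1
  funext v
  simp only [pvSub3, if_neg hac, if_neg hbc]
  by_cases v3 : v = c
  · simp [v3, hac, hbc]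
  · by_cases v1 : v = a
    · simp [v1, v3, Ne.symm hab, Ne.symm hac]
    · by_cases v2 : v = b <;> simp [v1, v2, v3, hab, Ne.symm hbc]

theorem pvRemove3_kkk (tiles : List Int) (r : Int → Int) (k : Int) (hOK : pvOK tiles r)
    (h3 : 3 ≤ r k) :
    pvRemove3 (pvRestrict tiles r) k k k
      = pvRestrict tiles (fun v => if v = k then r v - 3 else r v) := by
  simp only [pvRemove3]
  rw [pvRemoveStep tiles r k hOK (by omega)]
  have hOK1 : pvOK tiles (fun v => if v = k then r k - 1 else r v) :=
    pvOK_upd tiles r k (r k - 1) hOK (by omega) (by omega)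
  rw [pvRemoveStep tiles (fun v => if v = k then r k - 1 else r v) k hOK1 (by simp; omega)]
  have e2 : (fun v => (if v = k then (if k = k then r k - 1 else r k) - 1
        else if v = k then r k - 1 else r v))
      = (fun v => if v = k then r k - 2 else r v) := by
    funext v
    by_cases v1 : v = k <;> simp [v1]
    omega
  rw [e2]
  have hOK2 : pvOK tiles (fun v => if v = k then r k - 2 else r v) :=
    pvOK_upd tiles r k (r k - 2) hOK (by omega) (by omega)
  rw [pvRemoveStep tiles (fun v => if v = k then r k - 2 else r v) k hOK2 (by simp; omega)]
  congr 1
  funext v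
  by_cases hv : v = k <;> simp [hv]
  omega

theorem pvRunLoop_eq (tiles vlist : List Int) :
    ∀ (n idx : Nat) (r : Int → Int), pvOK tiles r →
    (pvRestrict tiles r).length + (vlist.length - idx) ≤ n →
    pvRunLoop vlist (pvRestrict tiles r) idx = pvRestrict tiles (pvSweep vlist idx r) := by
  intro n
  induction n with
  | zero =>
    intro idx r hOK hm
    have hidx : ¬ idx < vlist.length := by omega
    rw [pvRunLoop, dif_neg hidx, pvSweep, if_neg hidx]
  | succ n ih =>
    intro idx r hOK hm
    by_cases hlt : idx < vlist.length
    · rw [pvRunLoop, dif_pos hlt]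
      by_cases hcon : idx + 2 < vlist.length ∧
          vlist.getD (idx + 2) 0 - vlist.getD (idx + 1) 0 = 1 ∧
          vlist.getD (idx + 1) 0 - vlist.getD idx 0 = 1
      · have hd1 : vlist.getD (idx + 1) 0 ≠ vlist.getD idx 0 := by omega
        have hd2 : vlist.getD (idx + 2) 0 ≠ vlist.getD idx 0 := by omega
        have hd3 : vlist.getD (idx + 2) 0 ≠ vlist.getD (idx + 1) 0 := by omega
        by_cases hpos : 0 < r (vlist.getD idx 0) ∧ 0 < r (vlist.getD (idx + 1) 0) ∧
            0 < r (vlist.getD (idx + 2) 0)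
        · have hma := (mem_pvRestrict tiles r hOK _).mpr hpos.1
          have hmb := (mem_pvRestrict tiles r hOK _).mpr hpos.2.1
          have hmc := (mem_pvRestrict tiles r hOK _).mpr hpos.2.2
          rw [dif_pos ⟨hcon.1, hcon.2.1, hcon.2.2, hma, hmb, hmc⟩]
          have hlt3 := pvRemove3_length_lt (pvRestrict tiles r) _ _ _ hcon.2.1 hcon.2.2 hma hmb hmc
          have hrw := pvRemove3_restrict tiles r _ _ _ hOK hd1 hd2 hd3 hpos.1 hpos.2.1 hpos.2.2
          rw [hrw] at hlt3 ⊢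
          have hOK' : pvOK tiles (pvSub3 r (vlist.getD idx 0) (vlist.getD (idx + 1) 0) (vlist.getD (idx + 2) 0) 1) := by
            intro v
            have h1 := hOK v
            have h2 := hOK (vlist.getD idx 0)
            have h3 := hOK (vlist.getD (idx + 1) 0)
            have h4 := hOK (vlist.getD (idx + 2) 0)
            simp only [pvSub3]
            split_ifs with e1 e2 e3
            · subst e1; omega
            · subst e2; omega
            · subst e3; omega
            · omega
          rw [ih idx _ hOK' (by omega)]
          rw [pvSweep_dec vlist idx r _ _ _ rfl rfl rfl hcon.1 hcon.2.1 hcon.2.2]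
        · rw [dif_neg (fun hfull => hpos ⟨(mem_pvRestrict tiles r hOK _).mp hfull.2.2.2.1,
            (mem_pvRestrict tiles r hOK _).mp hfull.2.2.2.2.1,
            (mem_pvRestrict tiles r hOK _).mp hfull.2.2.2.2.2⟩)]
          rw [ih (idx + 1) r hOK (by omega)]
          conv_rhs => rw [pvSweep]
          rw [if_pos hlt, if_pos hcon]
          have hm0 : min (r (vlist.getD idx 0)) (min (r (vlist.getD (idx + 1) 0)) (r (vlist.getD (idx + 2) 0))) = 0 := by
            have h2 := hOK (vlist.getD idx 0)
            have h3 := hOK (vlist.getD (idx + 1) 0)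
            have h4 := hOK (vlist.getD (idx + 2) 0)
            omega
          rw [hm0]
          have hid : pvSub3 r (vlist.getD idx 0) (vlist.getD (idx + 1) 0) (vlist.getD (idx + 2) 0) 0 = r := by
            funext v
            simp only [pvSub3]
            split_ifs with e1 e2 e3
            · rw [e1]; ring
            · rw [e2]; ring
            · rw [e3]; ring
            · rfl
          rw [hid]
      · rw [dif_neg (fun hfull => hcon ⟨hfull.1, hfull.2.1, hfull.2.2.1⟩)]
        rw [ih (idx + 1) r hOK (by omega)]
        conv_rhs => rw [pvSweep]
        rw [if_pos hlt, if_neg hcon]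
    · rw [pvRunLoop, dif_neg hlt, pvSweep, if_neg hlt]

-- phase 2: one triplet per value, list side
theorem pvTriple_fold (tiles : List Int) (rfix : Int → Int) :
    ∀ (ks : List Int) (r : Int → Int), ks.Nodup → pvOK tiles r → (∀ k ∈ ks, r k = rfix k) →
    (ks.map (fun k => ((k, rfix k) : Int × Int))).foldl
        (fun t kv => if kv.2 ≥ 3 then pvRemove3 t kv.1 kv.1 kv.1 else t) (pvRestrict tiles r)
      = pvRestrict tiles (fun v => if v ∈ ks ∧ 3 ≤ rfix v then r v - 3 else r v) := by
  intro ks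
  induction ks with
  | nil =>
    intro r _ _ _
    simp
  | cons k ks ih =>
    intro r hnd hOK hagree
    have hknotin : k ∉ ks := (List.nodup_cons.mp hnd).1
    have hndtail : ks.Nodup := (List.nodup_cons.mp hnd).2
    have hk : r k = rfix k := hagree k (by simp)
    simp only [List.map_cons, List.foldl_cons]
    by_cases h3 : (3:Int) ≤ rfix k
    · rw [if_pos h3, pvRemove3_kkk tiles r k hOK (by omega)]
      have hOK' : pvOK tiles (fun v => if v = k then r v - 3 else r v) := by
        intro v
        have h1 := hOK v
        by_cases hv : v = k
        · subst hv; simp; omega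
        · simp [hv]; exact h1
      rw [ih _ hndtail hOK' (fun k' hk' => by
        have : k' ≠ k := fun h => hknotin (h ▸ hk')
        simp [this, hagree k' (List.mem_cons_of_mem _ hk')])]
      congr 1
      funext v
      by_cases hv : v = k
      · subst hv
        simp [hknotin, h3, hk]
      · simp only [List.mem_cons]
        by_cases hmem : v ∈ ks <;> simp [hv, hmem]
    · rw [if_neg h3]
      rw [ih _ hndtail hOK (fun k' hk' => hagree k' (List.mem_cons_of_mem _ hk'))]
      congr 1
      funext v
      by_cases hv : v = k
      · subst hv
        simp [hknotin, h3]
      · simp only [List.mem_cons]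
        by_cases hmem : v ∈ ks <;> simp [hv, hmem]

theorem pvIf3_comm (a b c w m : Int) (r : Int → Int)
    (hd1 : b ≠ a) (hd2 : c ≠ a) (hd3 : c ≠ b) :
    (if w = c then r c - m else if w = b then r b - m else if w = a then r a - m else r w)
      = (if w = a then r a - m else if w = b then r b - m else if w = c then r c - m else r w) := by
  by_cases w1 : w = a
  · subst w1
    rw [if_neg (Ne.symm hd2), if_neg (Ne.symm hd1), if_pos rfl, if_pos rfl]
  · by_cases w2 : w = b
    · subst w2
      rw [if_neg (Ne.symm hd3), if_pos rfl, if_neg hd1, if_pos rfl]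
    · by_cases w3 : w = c
      · subst w3
        rw [if_pos rfl, if_neg hd2, if_neg hd3, if_pos rfl]
      · rw [if_neg w3, if_neg w2, if_neg w1, if_neg w1, if_neg w2, if_neg w3]

-- B's sweep fold tracks pvSweep
theorem pvBSweep (vlist : List Int) :
    ∀ (k idx : Nat) (d : PySem.Dict Int Int) (r : Int → Int),
    (∀ v, d.getD v 0 = r v) → idx + k = vlist.length - 2 →
    ∀ v, ((List.range' idx k).foldl (pvSweepStepB vlist) d).getD v 0 = pvSweep vlist idx r v := by
  intro k
  induction k with
  | zero =>
    intro idx d r hd hk v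
    rw [show List.range' idx 0 = ([] : List Nat) from rfl, List.foldl_nil]
    rw [pvSweep_tail vlist vlist.length idx r (by omega) (by omega)]
    exact hd v
  | succ k ih =>
    intro idx d r hd hk v
    rw [List.range'_succ, List.foldl_cons]
    have hlen2 : idx + 2 < vlist.length := by omega
    have hlt : idx < vlist.length := by omega
    by_cases hcon : vlist.getD (idx + 2) 0 - vlist.getD (idx + 1) 0 = 1 ∧
        vlist.getD (idx + 1) 0 - vlist.getD idx 0 = 1
    · have hd1 : vlist.getD (idx + 1) 0 ≠ vlist.getD idx 0 := by omega
      have hd2 : vlist.getD (idx + 2) 0 ≠ vlist.getD idx 0 := by omega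
      have hd3 : vlist.getD (idx + 2) 0 ≠ vlist.getD (idx + 1) 0 := by omega
      have hstep : ∀ w, (pvSweepStepB vlist d idx).getD w 0
          = pvSub3 r (vlist.getD idx 0) (vlist.getD (idx + 1) 0) (vlist.getD (idx + 2) 0)
            (min (r (vlist.getD idx 0)) (min (r (vlist.getD (idx + 1) 0)) (r (vlist.getD (idx + 2) 0)))) w := by
        intro w
        simp only [pvSweepStepB]
        rw [if_pos hcon]
        simp only [PySem.Dict.getD_insert, hd]
        rw [if_neg hd1, if_neg hd3, if_neg hd2]
        simp only [pvSub3]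
        exact pvIf3_comm _ _ _ w _ r hd1 hd2 hd3
      conv_rhs => rw [pvSweep]
      rw [if_pos hlt, if_pos ⟨hlen2, hcon.1, hcon.2⟩]
      exact ih (idx + 1) _ _ hstep (by omega) v
    · have hstep : pvSweepStepB vlist d idx = d := by
        simp only [pvSweepStepB]
        rw [if_neg hcon]
      rw [hstep]
      conv_rhs => rw [pvSweep]
      rw [if_pos hlt, if_neg (fun h => hcon ⟨h.2.1, h.2.2⟩)]
      exact ih (idx + 1) d r hd (by omega) v

-- B's triplet fold in count space
theorem pvBTriple :
    ∀ (ks : List Int) (d : PySem.Dict Int Int) (r : Int → Int), ks.Nodup →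
    (∀ v, d.getD v 0 = r v) →
    ∀ v, (ks.foldl (fun d k => if d.getD k 0 ≥ 3 then d.insert k (d.getD k 0 - 3) else d) d).getD v 0
      = if v ∈ ks ∧ 3 ≤ r v then r v - 3 else r v := by
  intro ks
  induction ks with
  | nil =>
    intro d r _ hd v
    simp [hd v]
  | cons k ks ih =>
    intro d r hnd hd v
    have hknotin : k ∉ ks := (List.nodup_cons.mp hnd).1
    have hndtail : ks.Nodup := (List.nodup_cons.mp hnd).2
    rw [List.foldl_cons]
    by_cases h3 : d.getD k 0 ≥ 3
    · rw [if_pos h3]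
      have hr3 : (3:Int) ≤ r k := by rw [← hd k]; exact h3
      have hd' : ∀ w, (d.insert k (d.getD k 0 - 3)).getD w 0
          = (fun w => if w = k then r w - 3 else r w) w := by
        intro w
        rw [PySem.Dict.getD_insert]
        by_cases hw : w = k
        · subst hw; simp [hd w]
        · simp [hw, hd w]
      rw [ih _ _ hndtail hd' v]
      by_cases hv : v = k
      · subst hv; simp [hknotin, hr3]
      · simp only [List.mem_cons]
        by_cases hmem : v ∈ ks <;> simp [hv, hmem]
    · rw [if_neg h3]
      have hr3 : ¬ (3:Int) ≤ r k := by rw [← hd k]; exact h3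
      rw [ih _ _ hndtail hd v]
      by_cases hv : v = k
      · subst hv; simp [hknotin, hr3]
      · simp only [List.mem_cons]
        by_cases hmem : v ∈ ks <;> simp [hv, hmem]

theorem pvGetD_insert_fold (f : Int → Int) :
    ∀ (ks : List Int) (d : PySem.Dict Int Int) (v : Int),
    ((ks.foldl (fun d k => d.insert k (f k)) d).getD v 0) = if v ∈ ks then f v else d.getD v 0 := by
  intro ks
  induction ks with
  | nil => intro d v; simp
  | cons k ks ih =>
    intro d v
    rw [List.foldl_cons, ih]
    simp only [List.mem_cons]
    by_cases hv : v ∈ ks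
    · simp [hv]
    · by_cases hvk : v = k
      · subst hvk; simp [hv]
      · simp [hv, hvk, PySem.Dict.getD_insert]

theorem pvKept_fold :
    ∀ (l : List Int) (d : PySem.Dict Int Int) (s : Int → Int) (acc : List Int),
    (∀ v, d.getD v 0 = s v) →
    (l.foldl (fun (p : PySem.Dict Int Int × List Int) x =>
        if p.1.getD x 0 > 0 then (p.1.insert x (p.1.getD x 0 - 1), p.2) else (p.1, p.2 ++ [x]))
      (d, acc)).2 = acc ++ pvDrop l s := by
  intro l
  induction l with
  | nil => intro d s acc _; simp [pvDrop]
  | cons x xs ih =>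
    intro d s acc hd
    rw [List.foldl_cons]
    by_cases hx : 0 < s x
    · rw [if_pos (by rw [hd x]; exact hx)]
      have hd' : ∀ w, (d.insert x (d.getD x 0 - 1)).getD w 0
          = (fun y => if y = x then s x - 1 else s y) w := by
        intro w
        rw [PySem.Dict.getD_insert]
        by_cases hw : w = x
        · subst hw; simp [hd w]
        · simp [hw, hd w]
      rw [ih _ _ acc hd']
      rw [pvDrop_cons, if_pos hx]
    · rw [if_neg (by rw [hd x]; exact hx)]
      rw [ih _ _ (acc ++ [x]) hd]
      rw [pvDrop_cons, if_neg hx]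
      simp

-- the quadratic inner score as a counting formula
theorem pvScore_inner (c : Int) :
    ∀ (l : List Int) (s : Int),
    l.foldl (fun s cc =>
        if |cc - c| < 3 then s + (PySem.List.pyGet? ([10, 2, 1] : List Int) |cc - c|).getD 0 * 10 else s) s
      = s + 100 * (l.count c : Int) + 20 * ((l.count (c - 1) : Int) + (l.count (c + 1) : Int))
          + 10 * ((l.count (c - 2) : Int) + (l.count (c + 2) : Int)) := by
  intro l
  induction l with
  | nil => intro s; simp
  | cons x xs ih =>
    intro s
    rw [List.foldl_cons, ih]
    rw [pvCount_cons x xs c, pvCount_cons x xs (c - 1), pvCount_cons x xs (c + 1),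
        pvCount_cons x xs (c - 2), pvCount_cons x xs (c + 2)]
    by_cases h0 : x = c
    · rw [show x - c = (0:Int) from by omega]
      rw [if_pos (by norm_num : |(0:Int)| < 3)]
      rw [show (PySem.List.pyGet? ([10, 2, 1] : List Int) |(0:Int)|).getD 0 = 10 from rfl]
      split_ifs <;> omega
    · by_cases h1 : x = c - 1
      · rw [show x - c = (-1:Int) from by omega]
        rw [if_pos (by norm_num : |(-1:Int)| < 3)]
        rw [show (PySem.List.pyGet? ([10, 2, 1] : List Int) |(-1:Int)|).getD 0 = 2 from rfl]
        split_ifs <;> omega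
      · by_cases h2 : x = c + 1
        · rw [show x - c = (1:Int) from by omega]
          rw [if_pos (by norm_num : |(1:Int)| < 3)]
          rw [show (PySem.List.pyGet? ([10, 2, 1] : List Int) |(1:Int)|).getD 0 = 2 from rfl]
          split_ifs <;> omega
        · by_cases h3 : x = c - 2
          · rw [show x - c = (-2:Int) from by omega]
            rw [if_pos (by norm_num : |(-2:Int)| < 3)]
            rw [show (PySem.List.pyGet? ([10, 2, 1] : List Int) |(-2:Int)|).getD 0 = 1 from rfl]
            split_ifs <;> omega
          · by_cases h4 : x = c + 2
            · rw [show x - c = (2:Int) from by omega]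
              rw [if_pos (by norm_num : |(2:Int)| < 3)]
              rw [show (PySem.List.pyGet? ([10, 2, 1] : List Int) |(2:Int)|).getD 0 = 1 from rfl]
              split_ifs <;> omega
            · rw [if_neg (fun hlt => by have := abs_lt.mp hlt; omega)]
              split_ifs <;> omega

theorem pvScoreA_eq (temp2 : List Int) (c : Int) :
    pvScoreA temp2 c = 100 * (temp2.count c : Int)
      + 20 * ((temp2.count (c - 1) : Int) + (temp2.count (c + 1) : Int))
      + 10 * ((temp2.count (c - 2) : Int) + (temp2.count (c + 2) : Int)) := by
  unfold pvScoreA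
  rw [pvScore_inner c temp2 0]
  ring

theorem pvEnum_scan (f : Int → Int) :
    ∀ (l : List Int) (i0 : Int) (acc : Option Int × Int),
    (PySem.List.enumerate l i0).foldl (fun acc ic =>
        if f ic.2 < acc.2 then (some ic.2, f ic.2) else acc) acc
      = l.foldl (fun acc x => if f x < acc.2 then (some x, f x) else acc) acc := by
  intro l
  induction l with
  | nil => intro i0 acc; rfl
  | cons x xs ih =>
    intro i0 acc
    show List.foldl _ _ ((i0, x) :: PySem.List.enumerate xs (i0 + 1)) = _
    rw [List.foldl_cons, List.foldl_cons, ih]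

theorem pvScan_congr (fA fB : Int → Int) :
    ∀ (l : List Int), (∀ x ∈ l, fA x = fB x) → ∀ (acc : Option Int × Int),
    l.foldl (fun acc x => if fA x < acc.2 then (some x, fA x) else acc) acc
      = l.foldl (fun acc x => if fB x < acc.2 then (some x, fB x) else acc) acc := by
  intro l hl acc
  exact PySem.List.foldl_congr_mem l _ _ acc (fun acc x hx => by rw [hl x hx])

-- ===== VERDICT (by name: the statement is the Claim_ definition above) =====
theorem tile_score_spec : Claim_equal_tile_score := by
  intro type tiles _
  unfold Spec_tile_score
  by_cases hty : type = "character" ∨ type = "bamboo" ∨ type = "dots"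
  · simp only [tile_score, tile_score_alt, PySem.Dict.keys_counter]
    rw [if_pos hty, if_pos hty]
    set vlist := PySem.List.sorted (PySem.Set.ofList tiles) (fun x => x) false with hvl
    have hOK0 : pvOK tiles (pvCnt tiles) := fun v => ⟨Int.natCast_nonneg _, le_refl _⟩
    have hres0 : pvRestrict tiles (pvCnt tiles) = tiles := by
      unfold pvRestrict
      exact pvDrop_nonpos _ _ (fun v => by omega)
    set r1 := pvSweep vlist 0 (pvCnt tiles) with hr1
    have hOK1 : pvOK tiles r1 := pvSweep_ok tiles vlist vlist.length 0 _ (by omega) hOK0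
    have hA1 : pvRunLoop vlist tiles 0 = pvRestrict tiles r1 := by
      conv_lhs => rw [← hres0]
      exact pvRunLoop_eq tiles vlist (tiles.length + vlist.length) 0 _ hOK0
        (by rw [hres0]; omega)
    rw [hA1]
    set r2 : Int → Int := fun v => if 3 ≤ r1 v then r1 v - 3 else r1 v with hr2
    have hOK2 : pvOK tiles r2 := by
      intro v
      have h1 := hOK1 v
      simp only [hr2]
      split_ifs <;> omega
    have hitems : (PySem.Dict.counter (pvRestrict tiles r1)).items
        = (PySem.Set.ofList (pvRestrict tiles r1)).map (fun k => ((k, r1 k) : Int × Int)) := by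
      rw [PySem.Dict.items_counter]
      exact List.map_congr_left (fun k _ => by rw [count_pvRestrict tiles r1 hOK1 k])
    have hA2 : List.foldl (fun t kv => if kv.2 ≥ 3 then pvRemove3 t kv.1 kv.1 kv.1 else t)
        (pvRestrict tiles r1) (PySem.Dict.counter (pvRestrict tiles r1)).items
        = pvRestrict tiles r2 := by
      rw [hitems]
      rw [pvTriple_fold tiles r1 (PySem.Set.ofList (pvRestrict tiles r1)) r1
        (PySem.Set.nodup_ofList _) hOK1 (fun k _ => rfl)]
      congr 1
      funext v
      by_cases h3 : (3:Int) ≤ r1 v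
      · have hv : v ∈ PySem.Set.ofList (pvRestrict tiles r1) := by
          rw [PySem.Set.mem_ofList]
          exact (mem_pvRestrict tiles r1 hOK1 v).mpr (by omega)
        simp [hv, h3, hr2]
      · simp [h3, hr2]
    rw [hA2]
    have hB1 : ∀ v, ((List.range (vlist.length - 2)).foldl (pvSweepStepB vlist)
        (PySem.Dict.counter tiles)).getD v 0 = r1 v := by
      intro v
      rw [List.range_eq_range']
      exact pvBSweep vlist (vlist.length - 2) 0 _ (pvCnt tiles)
        (fun w => by rw [PySem.Dict.getD_counter]; rfl) (by omega) v
    have hndv : vlist.Nodup :=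
      ((PySem.List.sorted_perm (PySem.Set.ofList tiles) (fun x => x) false).nodup_iff).mpr
        (PySem.Set.nodup_ofList tiles)
    have hB2 : ∀ v, ((vlist.foldl (fun d k => if d.getD k 0 ≥ 3 then d.insert k (d.getD k 0 - 3) else d)
        ((List.range (vlist.length - 2)).foldl (pvSweepStepB vlist) (PySem.Dict.counter tiles)))).getD v 0
        = r2 v := by
      intro v
      rw [pvBTriple vlist _ r1 hndv hB1 v]
      by_cases hmem : v ∈ vlist
      · simp [hmem, hr2]
      · have hv0 : r1 v = 0 := by
          have h1 := hOK1 v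
          have hnt : v ∉ tiles := fun hvt => hmem (by
            rw [hvl, PySem.List.mem_sorted, PySem.Set.mem_ofList]
            exact hvt)
          have : tiles.count v = 0 := List.count_eq_zero_of_not_mem hnt
          simp only [pvCnt, this] at h1
          omega
        simp [hmem, hv0, hr2]
    set remD := (vlist.foldl (fun d k => if d.getD k 0 ≥ 3 then d.insert k (d.getD k 0 - 3) else d)
        ((List.range (vlist.length - 2)).foldl (pvSweepStepB vlist) (PySem.Dict.counter tiles))) with hremD
    have hkept : (tiles.foldl (fun (p : PySem.Dict Int Int × List Int) x =>
        if p.1.getD x 0 > 0 then (p.1.insert x (p.1.getD x 0 - 1), p.2) else (p.1, p.2 ++ [x]))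
        (((PySem.Set.ofList tiles).foldl
          (fun d k => d.insert k ((PySem.Dict.counter tiles).getD k 0 - remD.getD k 0))
          (PySem.Dict.empty : PySem.Dict Int Int)), [])).2 = pvRestrict tiles r2 := by
      rw [pvKept_fold tiles _ (fun v => ((PySem.Set.ofList tiles).foldl
          (fun d k => d.insert k ((PySem.Dict.counter tiles).getD k 0 - remD.getD k 0))
          (PySem.Dict.empty : PySem.Dict Int Int)).getD v 0) [] (fun v => rfl)]
      rw [List.nil_append]
      unfold pvRestrict
      apply pvDrop_congr
      intro x hx
      rw [pvGetD_insert_fold _ _ _ x]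
      have hxk : x ∈ PySem.Set.ofList tiles := (PySem.Set.mem_ofList tiles x).mpr hx
      rw [if_pos hxk, PySem.Dict.getD_counter, hB2 x]
      rfl
    rw [hkept]
    rw [pvEnum_scan (pvScoreA (pvRestrict tiles r2)) (pvRestrict tiles r2) 0 (none, 1000000)]
    apply pvScan_congr
    intro x _
    rw [pvScoreA_eq]
    simp only [pvScoreB]
    rw [count_pvRestrict tiles r2 hOK2 x, count_pvRestrict tiles r2 hOK2 (x - 1),
        count_pvRestrict tiles r2 hOK2 (x + 1), count_pvRestrict tiles r2 hOK2 (x - 2),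
        count_pvRestrict tiles r2 hOK2 (x + 2)]
    rw [hB2 x, hB2 (x - 1), hB2 (x + 1), hB2 (x - 2), hB2 (x + 2)]
    ring
  · simp only [tile_score, tile_score_alt]
    rw [if_neg hty, if_neg hty]
    apply PySem.List.foldl_congr_mem
    intro acc kv _
    rw [show (PySem.List.pyGet? ([10, 2, 1] : List Int) 0).getD 0 = (10:Int) from rfl]
    rw [show (10:Int) * kv.2 * 10 = 100 * kv.2 from by ring]
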